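-- pv_equiv track=rewrite | github.com/lingqingdada/asc-dev | tools/build/asc_op_compile_base/asc_op_compiler/super_kernel_op_infos.py | find_sub_kernel_name
-- ===== SOURCE A (Python) =====
-- def find_sub_kernel_name(origin_sub_kernel_names):
--     aiv_kernel_name = origin_sub_kernel_names[0]
--     aic_kernel_name = origin_sub_kernel_names[0]
--     for sub_kernel_name in origin_sub_kernel_names:
--         if '_mix_aiv_' in sub_kernel_name:
--             aiv_kernel_name = sub_kernel_name
--         elif '_mix_aic_' in sub_kernel_name:
--             aic_kernel_name = sub_kernel_name
--     return aiv_kernel_name, aic_kernel_name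
-- ===== SOURCE B (Python) =====
-- def find_sub_kernel_name(origin_sub_kernel_names):
--     default = origin_sub_kernel_names[0]
--     aiv_kernel_name = next(
--         (n for n in reversed(origin_sub_kernel_names) if '_mix_aiv_' in n),
--         default)
--     aic_kernel_name = next(
--         (n for n in reversed(origin_sub_kernel_names)
--          if '_mix_aic_' in n and '_mix_aiv_' not in n),
--         default)
--     return aiv_kernel_name, aic_kernel_name
-- ===== Notes on version B (the rewrite author's own statement) =====
-- stated objective: alternative
-- what changed: Replaces the single forward overwrite loop by two independent reverse searches (next over reversed), each returning the first match from the end; the aic search excludes names containing '_mix_aiv_' to match the elif priority.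
import Mathlib
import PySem

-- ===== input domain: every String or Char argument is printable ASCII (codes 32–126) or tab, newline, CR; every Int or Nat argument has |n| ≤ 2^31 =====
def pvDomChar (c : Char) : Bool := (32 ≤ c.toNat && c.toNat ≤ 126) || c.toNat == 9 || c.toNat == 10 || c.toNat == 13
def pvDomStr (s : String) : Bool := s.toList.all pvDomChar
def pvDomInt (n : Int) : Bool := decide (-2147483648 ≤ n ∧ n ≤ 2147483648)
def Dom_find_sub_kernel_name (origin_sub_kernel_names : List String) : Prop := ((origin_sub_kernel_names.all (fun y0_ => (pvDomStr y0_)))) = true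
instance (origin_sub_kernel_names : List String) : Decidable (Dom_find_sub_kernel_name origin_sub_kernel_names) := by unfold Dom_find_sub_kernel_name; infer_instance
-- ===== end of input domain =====

-- B replaces A's forward overwrite loop with two independent reverse searches (same cost, different decomposition); equivalence of the return values is proved on nonempty lists.

-- ===== PORT A =====
-- A indexes [0] (raises IndexError on []); Pre_ excludes []; the .getD "" is never reached inside Pre_.
def find_sub_kernel_name (origin_sub_kernel_names : List String) : String × String :=
  let d := (PySem.List.pyGet? origin_sub_kernel_names 0).getD ""
  origin_sub_kernel_names.foldl
    (fun (st : String × String) n =>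
      if PySem.Str.isIn "_mix_aiv_" n then (n, st.2)
      else if PySem.Str.isIn "_mix_aic_" n then (st.1, n)
      else st)
    (d, d)

-- ===== PORT B =====
def find_sub_kernel_name_alt (origin_sub_kernel_names : List String) : String × String :=
  let d := (PySem.List.pyGet? origin_sub_kernel_names 0).getD ""
  ((origin_sub_kernel_names.reverse.find? (fun n => PySem.Str.isIn "_mix_aiv_" n)).getD d,
   (origin_sub_kernel_names.reverse.find?
      (fun n => PySem.Str.isIn "_mix_aic_" n && !PySem.Str.isIn "_mix_aiv_" n)).getD d)

-- ===== PRECONDITION & SPEC =====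
-- Pre_ excludes the empty list, where the Python A (and B) raise IndexError on [0].
def Pre_find_sub_kernel_name (origin_sub_kernel_names : List String) : Prop :=
  origin_sub_kernel_names ≠ []
instance (origin_sub_kernel_names : List String) : Decidable (Pre_find_sub_kernel_name origin_sub_kernel_names) := by unfold Pre_find_sub_kernel_name; infer_instance
def pvWitness_find_sub_kernel_name : List String := ["k_mix_aiv_0", "k_mix_aic_1"]
def Spec_find_sub_kernel_name (origin_sub_kernel_names : List String) (out : String × String) : Prop := out = find_sub_kernel_name_alt origin_sub_kernel_names
instance (origin_sub_kernel_names : List String) (out : String × String) : Decidable (Spec_find_sub_kernel_name origin_sub_kernel_names out) := by unfold Spec_find_sub_kernel_name; infer_instance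

-- ===== CLAIM (what is proved, stated in full; the proofs are below) =====
def Claim_equal_find_sub_kernel_name : Prop := ∀ (origin_sub_kernel_names : List String), Dom_find_sub_kernel_name origin_sub_kernel_names → Pre_find_sub_kernel_name origin_sub_kernel_names → Spec_find_sub_kernel_name origin_sub_kernel_names (find_sub_kernel_name origin_sub_kernel_names)

-- ===== LEMMAS AND PROOFS =====
-- A's fold decomposes into two independent "last match" searches, i.e. first match on the reverse.
theorem pv_fold_eq (l : List String) : ∀ a b : String,
    l.foldl
      (fun (st : String × String) n =>
        if PySem.Str.isIn "_mix_aiv_" n then (n, st.2)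
        else if PySem.Str.isIn "_mix_aic_" n then (st.1, n)
        else st)
      (a, b)
    = ((l.reverse.find? (fun n => PySem.Str.isIn "_mix_aiv_" n)).getD a,
       (l.reverse.find?
          (fun n => PySem.Str.isIn "_mix_aic_" n && !PySem.Str.isIn "_mix_aiv_" n)).getD b) := by
  induction l with
  | nil => intro a b; simp
  | cons x l ih =>
    intro a b
    simp only [List.foldl_cons, List.reverse_cons, List.find?_append]
    by_cases h1 : PySem.Str.isIn "_mix_aiv_" x = true
    · simp only [h1, if_pos]
      rw [ih]
      cases hv : l.reverse.find? (fun n => PySem.Str.isIn "_mix_aiv_" n) <;>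
        cases hc : l.reverse.find?
          (fun n => PySem.Str.isIn "_mix_aic_" n && !PySem.Str.isIn "_mix_aiv_" n) <;>
        simp_all [List.find?]
    · by_cases h2 : PySem.Str.isIn "_mix_aic_" x = true
      · simp only [h1, h2, if_neg, if_pos, Bool.false_eq_true, not_false_iff]
        rw [ih]
        cases hv : l.reverse.find? (fun n => PySem.Str.isIn "_mix_aiv_" n) <;>
          cases hc : l.reverse.find?
            (fun n => PySem.Str.isIn "_mix_aic_" n && !PySem.Str.isIn "_mix_aiv_" n) <;>
          simp_all [List.find?]
      · simp only [h1, h2, if_neg, Bool.false_eq_true, not_false_iff]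
        rw [ih]
        cases hv : l.reverse.find? (fun n => PySem.Str.isIn "_mix_aiv_" n) <;>
          cases hc : l.reverse.find?
            (fun n => PySem.Str.isIn "_mix_aic_" n && !PySem.Str.isIn "_mix_aiv_" n) <;>
          simp_all [List.find?]

-- ===== VERDICT (by name: the statement is the Claim_ definition above) =====
theorem find_sub_kernel_name_spec : Claim_equal_find_sub_kernel_name := by
  intro l _ _
  unfold Spec_find_sub_kernel_name find_sub_kernel_name find_sub_kernel_name_alt
  exact pv_fold_eq l _ _
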